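-- pv_equiv track=rewrite | github.com/tenislinhares-design/tenis-linhares-torneio | app.py | possible_players_for_match_local
-- ===== SOURCE A (Python) =====
-- def possible_players_for_match_local(match, matches_by_id, cache):
--     """
--     Retorna todos os atletas que podem aparecer neste jogo,
--     usando apenas dados já carregados na memória.
--     """
--     match_id = match.get("id")
--     if match_id in cache:
--         return cache[match_id]
--
--     players = set()
--
--     if match.get("player1_id"):
--         players.add(match["player1_id"])
--     if match.get("player2_id"):
--         players.add(match["player2_id"])
--
--     for source_id in [match.get("source1_match_id"), match.get("source2_match_id")]:
--         if source_id and source_id in matches_by_id: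
--             players.update(possible_players_for_match_local(matches_by_id[source_id], matches_by_id, cache))
--
--     cache[match_id] = players
--     return players
-- ===== SOURCE B (Python) =====
-- def possible_players_for_match_local(match, matches_by_id, cache):
--     """Iterative post-order DFS with an explicit two-pass stack instead of recursion."""
--     mid = match.get("id")
--     if mid in cache:
--         return cache[mid]
--     stack = [(match, False)]
--     while stack:
--         m, ready = stack.pop()
--         i = m.get("id")
--         if not ready:
--             if i in cache:
--                 continue
--             stack.append((m, True))
--             for sid in (m.get("source2_match_id"), m.get("source1_match_id")):
--                 if sid and sid in matches_by_id:
--                     child = matches_by_id[sid]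
--                     if child.get("id") not in cache:
--                         stack.append((child, False))
--         else:
--             ps = set()
--             if m.get("player1_id"):
--                 ps.add(m["player1_id"])
--             if m.get("player2_id"):
--                 ps.add(m["player2_id"])
--             for sid in (m.get("source1_match_id"), m.get("source2_match_id")):
--                 if sid and sid in matches_by_id:
--                     ps |= cache.get(matches_by_id[sid].get("id"), set())
--             cache[i] = ps
--     return cache[mid]
-- ===== Notes on version B (the rewrite author's own statement) =====
-- stated objective: alternative
-- what changed: Replaces the memoized recursive tree walk by an iterative post-order DFS with an explicit two-pass stack (visit frames re-pushed as finalize frames), building each player set from the already-cached child sets; same shared cache, no Python recursion.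
import Mathlib
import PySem

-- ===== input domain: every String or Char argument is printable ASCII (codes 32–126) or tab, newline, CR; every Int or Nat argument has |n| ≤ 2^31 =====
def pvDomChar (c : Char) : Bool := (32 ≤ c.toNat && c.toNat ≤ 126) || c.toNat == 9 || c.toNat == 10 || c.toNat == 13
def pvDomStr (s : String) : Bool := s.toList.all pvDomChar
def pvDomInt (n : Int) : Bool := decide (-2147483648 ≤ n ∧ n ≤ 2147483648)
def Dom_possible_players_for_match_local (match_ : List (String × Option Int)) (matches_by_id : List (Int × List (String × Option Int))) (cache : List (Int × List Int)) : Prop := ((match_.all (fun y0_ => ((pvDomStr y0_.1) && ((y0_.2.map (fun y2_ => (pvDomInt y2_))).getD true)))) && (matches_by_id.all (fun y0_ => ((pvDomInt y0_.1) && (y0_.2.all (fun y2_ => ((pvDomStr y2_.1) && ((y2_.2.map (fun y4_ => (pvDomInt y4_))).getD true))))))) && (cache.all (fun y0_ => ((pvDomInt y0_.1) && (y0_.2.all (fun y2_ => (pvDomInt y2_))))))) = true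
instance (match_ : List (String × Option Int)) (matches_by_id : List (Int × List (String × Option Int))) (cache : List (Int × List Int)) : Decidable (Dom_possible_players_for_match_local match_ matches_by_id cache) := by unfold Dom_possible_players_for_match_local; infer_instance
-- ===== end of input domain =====

-- Equivalence is about the RETURN value; both Pythons also mutate `cache` (and in the same
-- way: each reachable match's player set is memoized into it), which is not modelled here.
-- B replaces A's memoized recursion by an iterative post-order DFS with an explicit two-pass
-- stack over the same shared cache (objective: alternative, no speed claim).

abbrev PVNode := List (String × Option Int)
abbrev PVCache := PySem.Dict (Option Int) (List Int)
abbrev PVM := PySem.Dict Int PVNode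

-- shared line-level helpers (both Pythons contain these very expressions)
-- m.get(k) : missing key and explicit None both give Lean `none` (exact)
def pvGetOpt (m : PVNode) (k : String) : Option Int :=
  match (PySem.Dict.mk m).get? k with
  | some (some x) => some x
  | _ => none

-- Python truthiness of an Optional[int]: None and 0 are falsy (exact)
def pvTruthy (o : Option Int) : Option Int :=
  match o with
  | some x => if x = 0 then none else some x
  | none => none

def pvIdOf (m : PVNode) : Option Int := pvGetOpt m "id"

-- players = set(); if m.get("player1_id"): players.add(m["player1_id"]); same for player2
def pvPlayers0 (m : PVNode) : PySem.Set Int :=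
  let p : PySem.Set Int := PySem.Set.empty
  let p := match pvTruthy (pvGetOpt m "player1_id") with
           | some x => PySem.Set.add p x
           | none => p
  match pvTruthy (pvGetOpt m "player2_id") with
  | some x => PySem.Set.add p x
  | none => p

-- the literal list [m.get("source1_match_id"), m.get("source2_match_id")]
def pvSrcs (m : PVNode) : List (Option Int) :=
  [pvGetOpt m "source1_match_id", pvGetOpt m "source2_match_id"]

-- ===== PORT A =====
-- one iteration of A's `for source_id in [...]` loop body (go = the recursive call)
def pvSrcStep (M : PVM) (go : PVNode → PVCache → Option (List Int × PVCache))
    (st : Option (PySem.Set Int × PVCache)) (sid : Option Int) :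
    Option (PySem.Set Int × PVCache) :=
  match st with
  | none => none
  | some (p, c) =>
    match pvTruthy sid with
    | none => some (p, c)
    | some s =>
      match M.get? s with
      | none => some (p, c)
      | some child =>
        match go child c with
        | none => none
        | some (v, c') => some (PySem.Set.update p v, c')

-- A's recursion, with fuel (none = fuel ran out; Python instead raises RecursionError on
-- the cyclic descents Pre_ excludes); the cache is threaded explicitly, keyed by
-- Option Int because A stores `cache[match.get("id")]` even when the id is None.
def pvGoA (M : PVM) : Nat → PVNode → PVCache → Option (List Int × PVCache)
  | 0, _, _ => none
  | fuel+1, m, c =>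
    match c.get? (pvIdOf m) with
    | some v => some (v, c)
    | none =>
      match (pvSrcs m).foldl (pvSrcStep M (pvGoA M fuel)) (some (pvPlayers0 m, c)) with
      | none => none
      | some (p, c2) => some (p, c2.insert (pvIdOf m) p)

def possible_players_for_match_local (match_ : List (String × Option Int)) (matches_by_id : List (Int × List (String × Option Int))) (cache : List (Int × List Int)) : List Int :=
  match pvGoA (PySem.Dict.mk matches_by_id) (matches_by_id.length + 2) match_
      (PySem.Dict.mk (cache.map (fun q => ((some q.1 : Option Int), q.2)))) with
  | some (v, _) => v
  | none => []      -- fuel exhaustion: only on the cyclic descents excluded by Pre_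

-- ===== PORT B =====
-- `if sid and sid in matches_by_id: child = matches_by_id[sid]; if child.get("id") not in cache: stack.append((child, False))`
def pvPushOf (M : PVM) (c : PVCache) (sid : Option Int) : List (PVNode × Bool) :=
  match pvTruthy sid with
  | none => []
  | some s =>
    match M.get? s with
    | none => []
    | some child =>
      match c.get? (pvIdOf child) with
      | some _ => []
      | none => [(child, false)]

-- finalize pass: `if sid and sid in matches_by_id: ps |= cache.get(matches_by_id[sid].get("id"), set())`
def pvFinSrc (M : PVM) (c : PVCache) (p : PySem.Set Int) (sid : Option Int) : PySem.Set Int :=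
  match pvTruthy sid with
  | none => p
  | some s =>
    match M.get? s with
    | none => p
    | some child => PySem.Set.update p ((c.get? (pvIdOf child)).getD [])

-- B's `while stack:` loop, with fuel (the Python loop runs unboundedly; on the cyclic
-- inputs Pre_ excludes it diverges — head of the list = top of the stack)
def pvRunB (M : PVM) : Nat → List (PVNode × Bool) → PVCache → Option PVCache
  | _, [], c => some c
  | 0, _ :: _, _ => none
  | fuel+1, (m, ready) :: rest, c =>
    if ready then
      pvRunB M fuel rest (c.insert (pvIdOf m) ((pvSrcs m).foldl (pvFinSrc M c) (pvPlayers0 m)))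
    else
      match c.get? (pvIdOf m) with
      | some _ => pvRunB M fuel rest c
      | none =>
        pvRunB M fuel
          (pvPushOf M c (pvGetOpt m "source1_match_id") ++
           pvPushOf M c (pvGetOpt m "source2_match_id") ++ (m, true) :: rest) c

def possible_players_for_match_local_alt (match_ : List (String × Option Int)) (matches_by_id : List (Int × List (String × Option Int))) (cache : List (Int × List Int)) : List Int :=
  let M := PySem.Dict.mk matches_by_id
  let c0 : PVCache := PySem.Dict.mk (cache.map (fun q => ((some q.1 : Option Int), q.2)))
  match c0.get? (pvIdOf match_) with
  | some v => v
  | none =>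
    match pvRunB M (2 ^ (matches_by_id.length + 4)) [(match_, false)] c0 with
    | some c' => ((c'.get? (pvIdOf match_)).getD [])  -- `return cache[mid]`: the root is always finalized
    | none => []

-- ===== PRECONDITION & SPEC =====
-- `pvUnc C node`: the node's id is NOT initially cached (A's `id in cache` test never
-- hits an initial entry for it; an id of None can never match the Int keys of `cache`)
def pvUnc (C : List Int) (m : PVNode) : Bool :=
  match pvIdOf m with
  | some i => !(C.contains i)
  | none => true

-- the source keys of node m that exist in matches_by_id and lead to an initially-uncached
-- match (0/None sources are falsy in A and make no edge)
def pvSuccsOf (mbl : List (Int × PVNode)) (C : List Int) (m : PVNode) : List Int :=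
  ((pvSrcs m).filterMap pvTruthy).filter
    (fun s => match (PySem.Dict.mk mbl).get? s with
              | some ch => pvUnc C ch
              | none => false)

def pvSuccsU (mbl : List (Int × PVNode)) (C : List Int) (k : Int) : List Int :=
  match (PySem.Dict.mk mbl).get? k with
  | none => []
  | some m => pvSuccsOf mbl C m

def pvStepR (succ : Int → List Int) (X : List Int) : List Int :=
  PySem.Set.update X (X.flatMap succ)

def pvReach (succ : Int → List Int) : Nat → List Int → List Int
  | 0, X => X
  | n+1, X => pvReach succ n (pvStepR succ X)

-- the keys reachable from the root match's sources through initially-uncached matches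
def pvReachRoot (match_ : PVNode) (mbl : List (Int × PVNode)) (C : List Int) : List Int :=
  pvReach (pvSuccsU mbl C) mbl.length (pvSuccsOf mbl C match_)

-- Pre_ excludes inputs whose matches_by_id key graph has a cycle among the matches
-- reachable from the root's source links through initially-uncached matches: there A's
-- unmemoized descent raises RecursionError (and B's loop diverges) — except in degenerate
-- duplicate-id corners where a cache entry written mid-run accidentally covers the cycle;
-- those rare inputs are over-excluded (A and B still return the same value there, see cite).
def Pre_possible_players_for_match_local (match_ : List (String × Option Int)) (matches_by_id : List (Int × List (String × Option Int))) (cache : List (Int × List Int)) : Prop :=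
  ((PySem.Dict.mk (cache.map (fun q => ((some q.1 : Option Int), q.2)))).get? (pvIdOf match_)).isSome ∨
  ∀ k ∈ pvReachRoot match_ matches_by_id (cache.map Prod.fst),
    k ∉ pvReach (pvSuccsU matches_by_id (cache.map Prod.fst)) matches_by_id.length
          (pvSuccsU matches_by_id (cache.map Prod.fst) k)

instance (match_ : List (String × Option Int)) (matches_by_id : List (Int × List (String × Option Int))) (cache : List (Int × List Int)) : Decidable (Pre_possible_players_for_match_local match_ matches_by_id cache) := by unfold Pre_possible_players_for_match_local; infer_instance

def pvWitness_possible_players_for_match_local : (List (String × Option Int)) × (List (Int × List (String × Option Int))) × (List (Int × List Int)) :=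
  ([("id", some 1), ("player1_id", some 10)], [(2, [("id", some 2), ("player2_id", some 11)])], [])

def Spec_possible_players_for_match_local (match_ : List (String × Option Int)) (matches_by_id : List (Int × List (String × Option Int))) (cache : List (Int × List Int)) (out : List Int) : Prop := out = possible_players_for_match_local_alt match_ matches_by_id cache
instance (match_ : List (String × Option Int)) (matches_by_id : List (Int × List (String × Option Int))) (cache : List (Int × List Int)) (out : List Int) : Decidable (Spec_possible_players_for_match_local match_ matches_by_id cache out) := by unfold Spec_possible_players_for_match_local; infer_instance
def Claim_equal_possible_players_for_match_local : Prop := ∀ (match_ : List (String × Option Int)) (matches_by_id : List (Int × List (String × Option Int))) (cache : List (Int × List Int)), Dom_possible_players_for_match_local match_ matches_by_id cache → Pre_possible_players_for_match_local match_ matches_by_id cache → Spec_possible_players_for_match_local match_ matches_by_id cache (possible_players_for_match_local match_ matches_by_id cache)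


-- ===== LEMMAS AND PROOFS =====

theorem pvRunB_mono (M : PVM) : ∀ (f : Nat) {f' : Nat} {s : List (PVNode × Bool)} {c r : PVCache},
    f ≤ f' → pvRunB M f s c = some r → pvRunB M f' s c = some r := by
  intro f
  induction f with
  | zero =>
    intro f' s c r _ h
    cases s with
    | nil =>
      cases f' <;> simpa [pvRunB] using h
    | cons a s => simp [pvRunB] at h
  | succ f ih =>
    intro f' s c r hle h
    cases s with
    | nil => cases f' <;> simpa [pvRunB] using h
    | cons fr rest =>
      obtain ⟨f'', rfl⟩ : ∃ f'', f' = f'' + 1 := ⟨f' - 1, by omega⟩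
      obtain ⟨m, rd⟩ := fr
      cases rd with
      | true =>
        simp only [pvRunB, if_true] at h ⊢
        exact ih (by omega) h
      | false =>
        simp only [pvRunB] at h ⊢
        cases hc : PySem.Dict.get? c (pvIdOf m) <;> simp only [hc] at h ⊢
        · exact ih (by omega) h
        · exact ih (by omega) h


theorem pvFold2 (m : PVNode) {α : Type} (g : α → Option Int → α) (init : α) :
    (pvSrcs m).foldl g init =
      g (g init (pvGetOpt m "source1_match_id")) (pvGetOpt m "source2_match_id") := rfl

theorem pvSrcStep_preserve (M : PVM) {go : PVNode → PVCache → Option (List Int × PVCache)}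
    (hgo : ∀ {m c v c'}, go m c = some (v, c') → ∀ {j w}, c.get? j = some w → c'.get? j = some w) :
    ∀ {p c sid p' c'}, pvSrcStep M go (some (p, c)) sid = some (p', c') →
      ∀ {j w}, c.get? j = some w → c'.get? j = some w := by
  intro p c sid p' c' h j w hj
  simp only [pvSrcStep] at h
  cases ht : pvTruthy sid with
  | none => simp [ht] at h; exact h.2 ▸ hj
  | some s =>
    simp only [ht] at h
    cases hg : M.get? s with
    | none => simp [hg] at h; exact h.2 ▸ hj
    | some child =>
      simp only [hg] at h
      cases hc : go child c with
      | none => simp [hc] at h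
      | some x =>
        obtain ⟨v, c1⟩ := x
        simp [hc] at h
        exact h.2 ▸ hgo hc hj

theorem pvGoA_preserve (M : PVM) : ∀ (f : Nat) {m : PVNode} {c : PVCache} {v c'},
    pvGoA M f m c = some (v, c') → ∀ {j w}, c.get? j = some w → c'.get? j = some w := by
  intro f
  induction f with
  | zero => intro m c v c' h; simp [pvGoA] at h
  | succ f ih =>
    intro m c v c' h j w hj
    have hpres : ∀ {p c sid p' c'}, pvSrcStep M (pvGoA M f) (some (p, c)) sid = some (p', c') →
        ∀ {j w}, PySem.Dict.get? c j = some w → PySem.Dict.get? c' j = some w :=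
      pvSrcStep_preserve M (fun {m c v c'} h {j w} hj => ih h hj)
    simp only [pvGoA] at h
    cases hc : PySem.Dict.get? c (pvIdOf m) with
    | some v0 =>
      simp only [hc, Option.some.injEq, Prod.mk.injEq] at h
      obtain ⟨rfl, rfl⟩ := h
      exact hj
    | none =>
      simp only [hc] at h
      rw [pvFold2] at h
      cases h1 : pvSrcStep M (pvGoA M f) (some (pvPlayers0 m, c)) (pvGetOpt m "source1_match_id") with
      | none => rw [h1] at h; simp [pvSrcStep] at h
      | some st1 =>
        obtain ⟨p1, c1⟩ := st1
        rw [h1] at h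
        cases h2 : pvSrcStep M (pvGoA M f) (some (p1, c1)) (pvGetOpt m "source2_match_id") with
        | none => rw [h2] at h; simp at h
        | some st2 =>
          obtain ⟨p2, c2⟩ := st2
          rw [h2] at h
          simp only [Option.some.injEq, Prod.mk.injEq] at h
          obtain ⟨rfl, rfl⟩ := h
          have hc1 : c1.get? j = some w := hpres h1 hj
          have hc2 : c2.get? j = some w := hpres h2 hc1
          have hne : j ≠ pvIdOf m := by
            intro he; rw [he, hc] at hj; cases hj
          simp [PySem.Dict.get?_insert, hne]
          exact hc2

theorem pvGoA_post (M : PVM) : ∀ (f : Nat) {m : PVNode} {c : PVCache} {v c'},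
    pvGoA M f m c = some (v, c') → c'.get? (pvIdOf m) = some v := by
  intro f m c v c' h
  cases f with
  | zero => simp [pvGoA] at h
  | succ f =>
    simp only [pvGoA] at h
    cases hc : PySem.Dict.get? c (pvIdOf m) with
    | some v0 =>
      simp only [hc, Option.some.injEq, Prod.mk.injEq] at h
      obtain ⟨rfl, rfl⟩ := h
      exact hc
    | none =>
      simp only [hc] at h
      cases hf : (pvSrcs m).foldl (pvSrcStep M (pvGoA M f)) (some (pvPlayers0 m, c)) with
      | none => rw [hf] at h; cases h
      | some st =>
        obtain ⟨p, c2⟩ := st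
        rw [hf] at h
        simp only [Option.some.injEq, Prod.mk.injEq] at h
        obtain ⟨rfl, rfl⟩ := h
        exact PySem.Dict.get?_insert_self _ _ _

theorem pvRunB_unready_hit (M : PVM) {m : PVNode} {rest : List (PVNode × Bool)} {c : PVCache} {f : Nat} {w}
    (h : c.get? (pvIdOf m) = some w) :
    pvRunB M (f+1) ((m, false) :: rest) c = pvRunB M f rest c := by
  simp [pvRunB, h]

theorem pvRunB_unready_miss (M : PVM) {m : PVNode} {rest : List (PVNode × Bool)} {c : PVCache} {f : Nat}
    (h : c.get? (pvIdOf m) = none) :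
    pvRunB M (f+1) ((m, false) :: rest) c =
      pvRunB M f (pvPushOf M c (pvGetOpt m "source1_match_id") ++
        pvPushOf M c (pvGetOpt m "source2_match_id") ++ (m, true) :: rest) c := by
  simp [pvRunB, h]

theorem pvRunB_ready (M : PVM) {m : PVNode} {rest : List (PVNode × Bool)} {c : PVCache} {f : Nat} :
    pvRunB M (f+1) ((m, true) :: rest) c =
      pvRunB M f rest (c.insert (pvIdOf m) ((pvSrcs m).foldl (pvFinSrc M c) (pvPlayers0 m))) := by
  simp [pvRunB]

-- a hit in the cache makes A's recursion return immediately
theorem pvGoA_hit (M : PVM) {fa : Nat} {child : PVNode} {cin : PVCache} {w x}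
    (hhit : cin.get? (pvIdOf child) = some w)
    (hga : pvGoA M fa child cin = some x) : x = (w, cin) := by
  cases fa with
  | zero => simp [pvGoA] at hga
  | succ fa =>
    simp only [pvGoA, hhit, Option.some.injEq] at hga
    exact hga.symm

theorem pvGoA_hit_succ (M : PVM) {f : Nat} {m : PVNode} {c : PVCache} {v}
    (hhit : c.get? (pvIdOf m) = some v) :
    pvGoA M (f+1) m c = some (v, c) := by
  simp [pvGoA, hhit]

-- finalize pass reads back exactly the value A's loop obtained for this source
theorem pvChildFin (M : PVM) {fa : Nat} {p : PySem.Set Int} {cin : PVCache} {sid : Option Int} {p' cout}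
    (hstep : pvSrcStep M (pvGoA M fa) (some (p, cin)) sid = some (p', cout))
    {cfin : PVCache}
    (hpf : ∀ {j w}, cout.get? j = some w → cfin.get? j = some w) :
    pvFinSrc M cfin p sid = p' := by
  simp only [pvSrcStep] at hstep
  cases ht : pvTruthy sid with
  | none =>
    simp only [ht, Option.some.injEq, Prod.mk.injEq] at hstep
    simp [pvFinSrc, ht, hstep.1]
  | some s =>
    simp only [ht] at hstep
    cases hg : M.get? s with
    | none =>
      simp only [hg, Option.some.injEq, Prod.mk.injEq] at hstep
      simp [pvFinSrc, ht, hg, hstep.1]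
    | some child =>
      simp only [hg] at hstep
      cases hga : pvGoA M fa child cin with
      | none => rw [hga] at hstep; cases hstep
      | some x =>
        obtain ⟨v, c1⟩ := x
        rw [hga] at hstep
        simp only [Option.some.injEq, Prod.mk.injEq] at hstep
        obtain ⟨rfl, rfl⟩ := hstep
        have hv := pvGoA_post M fa hga
        have := hpf hv
        simp [pvFinSrc, ht, hg, this]

-- processing one pushed source frame of B's machine tracks A's loop iteration
theorem pvChildRun (M : PVM) {fa : Nat}
    (ih : ∀ {m c v c'}, pvGoA M fa m c = some (v, c') →
      ∀ {rest fb r}, pvRunB M fb rest c' = some r →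
        pvRunB M (2 ^ (fa + 2) - 2 + fb) ((m, false) :: rest) c = some r)
    {p : PySem.Set Int} {cin cpush : PVCache} {sid : Option Int} {p' cout}
    (hstep : pvSrcStep M (pvGoA M fa) (some (p, cin)) sid = some (p', cout))
    (hpres : ∀ {j w}, cpush.get? j = some w → cin.get? j = some w)
    {rest fb r} (hrest : pvRunB M fb rest cout = some r) :
    pvRunB M (2 ^ (fa + 2) - 2 + fb) (pvPushOf M cpush sid ++ rest) cin = some r := by
  have hpow : 4 ≤ 2 ^ (fa + 2) := by
    calc (4 : Nat) = 2 ^ 2 := by norm_num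
    _ ≤ 2 ^ (fa + 2) := Nat.pow_le_pow_right (by norm_num) (by omega)
  simp only [pvSrcStep] at hstep
  cases ht : pvTruthy sid with
  | none =>
    simp only [ht, Option.some.injEq, Prod.mk.injEq] at hstep
    rw [show pvPushOf M cpush sid = [] from by simp [pvPushOf, ht], List.nil_append]
    exact pvRunB_mono M fb (by omega) (hstep.2 ▸ hrest)
  | some s =>
    simp only [ht] at hstep
    cases hg : M.get? s with
    | none =>
      simp only [hg, Option.some.injEq, Prod.mk.injEq] at hstep
      rw [show pvPushOf M cpush sid = [] from by simp [pvPushOf, ht, hg], List.nil_append]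
      exact pvRunB_mono M fb (by omega) (hstep.2 ▸ hrest)
    | some child =>
      simp only [hg] at hstep
      cases hga : pvGoA M fa child cin with
      | none => rw [hga] at hstep; cases hstep
      | some x =>
        obtain ⟨v, c1⟩ := x
        rw [hga] at hstep
        simp only [Option.some.injEq, Prod.mk.injEq] at hstep
        obtain ⟨rfl, rfl⟩ := hstep
        cases hp : cpush.get? (pvIdOf child) with
        | some w =>
          rw [show pvPushOf M cpush sid = [] from by simp [pvPushOf, ht, hg, hp], List.nil_append]
          have hx := pvGoA_hit M (hpres hp) hga
          have hceq : c1 = cin := congrArg Prod.snd hx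
          rw [hceq] at hrest
          exact pvRunB_mono M fb (by omega) hrest
        | none =>
          rw [show pvPushOf M cpush sid = [(child, false)] from by simp [pvPushOf, ht, hg, hp]]
          cases hpop : cin.get? (pvIdOf child) with
          | some w =>
            have hx := pvGoA_hit M hpop hga
            rw [show (2 ^ (fa + 2) - 2 + fb) = (2 ^ (fa + 2) - 3 + fb) + 1 from by omega,
               List.cons_append, List.nil_append, pvRunB_unready_hit M hpop]
            have hceq : c1 = cin := congrArg Prod.snd hx
            rw [hceq] at hrest
            exact pvRunB_mono M fb (by omega) hrest
          | none =>
            rw [List.cons_append, List.nil_append]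
            exact ih hga hrest

-- the simulation: one unready frame of B's machine does to the cache exactly what one
-- call of A's recursion does
theorem pvSim (M : PVM) : ∀ (fa : Nat) {m : PVNode} {c : PVCache} {v c'},
    pvGoA M fa m c = some (v, c') →
    ∀ {rest fb r}, pvRunB M fb rest c' = some r →
      pvRunB M (2 ^ (fa + 2) - 2 + fb) ((m, false) :: rest) c = some r := by
  intro fa
  induction fa with
  | zero => intro m c v c' h; simp [pvGoA] at h
  | succ fa ih =>
    intro m c v c' h rest fb r hrest
    have hpow : 4 ≤ 2 ^ (fa + 2) := by
      calc (4 : Nat) = 2 ^ 2 := by norm_num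
      _ ≤ 2 ^ (fa + 2) := Nat.pow_le_pow_right (by norm_num) (by omega)
    have hpow2 : 2 ^ (fa + 1 + 2) = 2 * 2 ^ (fa + 2) := by
      rw [show fa + 1 + 2 = (fa + 2) + 1 from rfl, pow_succ]; ring
    simp only [pvGoA] at h
    cases hc : PySem.Dict.get? c (pvIdOf m) with
    | some v0 =>
      simp only [hc, Option.some.injEq, Prod.mk.injEq] at h
      obtain ⟨rfl, rfl⟩ := h
      rw [show (2 ^ (fa + 1 + 2) - 2 + fb) = (2 ^ (fa + 1 + 2) - 3 + fb) + 1 from by omega,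
         pvRunB_unready_hit M hc]
      exact pvRunB_mono M fb (by omega) hrest
    | none =>
      simp only [hc] at h
      rw [pvFold2] at h
      cases h1 : pvSrcStep M (pvGoA M fa) (some (pvPlayers0 m, c)) (pvGetOpt m "source1_match_id") with
      | none => rw [h1] at h; simp [pvSrcStep] at h
      | some st1 =>
        obtain ⟨p1, c1⟩ := st1
        rw [h1] at h
        cases h2 : pvSrcStep M (pvGoA M fa) (some (p1, c1)) (pvGetOpt m "source2_match_id") with
        | none => rw [h2] at h; simp at h
        | some st2 =>
          obtain ⟨p2, c2⟩ := st2
          rw [h2] at h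
          simp only [Option.some.injEq, Prod.mk.injEq] at h
          obtain ⟨rfl, rfl⟩ := h
          have pres1 : ∀ {j w}, c.get? j = some w → c1.get? j = some w :=
            pvSrcStep_preserve M (fun {m c v c'} hh {j w} hj => pvGoA_preserve M fa hh hj) h1
          have pres2 : ∀ {j w}, c1.get? j = some w → c2.get? j = some w :=
            pvSrcStep_preserve M (fun {m c v c'} hh {j w} hj => pvGoA_preserve M fa hh hj) h2
          have hfin1 : pvFinSrc M c2 (pvPlayers0 m) (pvGetOpt m "source1_match_id") = p1 :=
            pvChildFin M h1 (fun {j w} hj => pres2 hj)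
          have hfin2 : pvFinSrc M c2 p1 (pvGetOpt m "source2_match_id") = p2 :=
            pvChildFin M h2 (fun {j w} hj => hj)
          have fin : pvRunB M (fb + 1) ((m, true) :: rest) c2 = some r := by
            rw [pvRunB_ready, pvFold2, hfin1, hfin2]
            exact hrest
          have tail := pvChildRun M ih h2 (fun {j w} hj => pres1 hj) (fb := fb + 1) fin
          have main := pvChildRun M ih h1 (fun {j w} hj => hj)
            (fb := 2 ^ (fa + 2) - 2 + (fb + 1)) tail
          rw [show (2 ^ (fa + 1 + 2) - 2 + fb) =
              (2 ^ (fa + 2) - 2 + (2 ^ (fa + 2) - 2 + (fb + 1))) + 1 from by omega,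
             pvRunB_unready_miss M hc]
          simpa [List.append_assoc] using main

-- ===== fuel sufficiency of A's recursion under Pre_ =====

def pvExt (c0 c : PVCache) : Prop := ∀ j w, c0.get? j = some w → c.get? j = some w

theorem pvMemKeys {mbl : List (Int × PVNode)} {s : Int} {child : PVNode}
    (h : (PySem.Dict.mk mbl).get? s = some child) : s ∈ mbl.map Prod.fst := by
  by_contra hn
  have hnone : (PySem.Dict.mk mbl).get? s = none := by
    rw [PySem.Dict.get?_eq_none_iff_not_mem_keys]
    simpa [PySem.Dict.keys] using hn
  rw [hnone] at h; cases h

-- an id absent from the initial cache dict is absent from its Int key list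
theorem pvUnc_of_none {cache : List (Int × List Int)} {child : PVNode}
    (h : (PySem.Dict.mk (cache.map (fun q => ((some q.1 : Option Int), q.2)))).get? (pvIdOf child) = none) :
    pvUnc (cache.map Prod.fst) child = true := by
  rw [PySem.Dict.get?_eq_none_iff_not_mem_keys] at h
  unfold pvUnc
  cases hid : pvIdOf child with
  | none => rfl
  | some i =>
    rw [hid] at h
    simp only [Bool.not_eq_eq_eq_not, Bool.not_true, ← Bool.not_eq_true, List.contains_eq_mem,
      decide_eq_true_eq]
    intro hmem
    apply h
    simp only [PySem.Dict.keys, List.map_map]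
    obtain ⟨q, hq, rfl⟩ := List.mem_map.mp hmem
    exact List.mem_map.mpr ⟨q, hq, rfl⟩

theorem pvSuccsOf_intro {mbl : List (Int × PVNode)} {C : List Int} {m child : PVNode}
    {sid : Option Int} {s : Int}
    (hsid : sid ∈ pvSrcs m) (hts : pvTruthy sid = some s)
    (hgs : (PySem.Dict.mk mbl).get? s = some child) (hU : pvUnc C child = true) :
    s ∈ pvSuccsOf mbl C m := by
  unfold pvSuccsOf
  exact List.mem_filter.mpr ⟨List.mem_filterMap.mpr ⟨sid, hsid, hts⟩, by simp [hgs, hU]⟩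

theorem pvSuccsU_intro {mbl : List (Int × PVNode)} {C : List Int} {k : Int} {m child : PVNode}
    {sid : Option Int} {s : Int}
    (hm : (PySem.Dict.mk mbl).get? k = some m) (hsid : sid ∈ pvSrcs m)
    (hts : pvTruthy sid = some s) (hgs : (PySem.Dict.mk mbl).get? s = some child)
    (hU : pvUnc C child = true) :
    s ∈ pvSuccsU mbl C k := by
  unfold pvSuccsU
  rw [hm]
  exact pvSuccsOf_intro hsid hts hgs hU

theorem pvStep_grow {succ : Int → List Int} {X : List Int} : X ⊆ pvStepR succ X := by
  intro x hx
  exact (PySem.Set.mem_update _ _ _).mpr (Or.inl hx)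

theorem pvStep_succs_sub {succ : Int → List Int} {X : List Int} {a : Int} (ha : a ∈ X) :
    succ a ⊆ pvStepR succ X := by
  intro x hx
  exact (PySem.Set.mem_update _ _ _).mpr (Or.inr (List.mem_flatMap.mpr ⟨a, ha, hx⟩))

theorem pvStep_mono {succ : Int → List Int} {X Y : List Int} (h : X ⊆ Y) :
    pvStepR succ X ⊆ pvStepR succ Y := by
  intro x hx
  rcases (PySem.Set.mem_update _ _ _).mp hx with hx | hx
  · exact pvStep_grow (h hx)
  · obtain ⟨a, ha, hax⟩ := List.mem_flatMap.mp hx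
    exact pvStep_succs_sub (h ha) hax

theorem pvReach_mono {succ : Int → List Int} : ∀ (n : Nat) {X Y : List Int}, X ⊆ Y →
    pvReach succ n X ⊆ pvReach succ n Y := by
  intro n
  induction n with
  | zero => intro X Y h; simpa [pvReach] using h
  | succ n ih =>
    intro X Y h
    simpa only [pvReach] using ih (pvStep_mono h)

theorem pvReach_grow {succ : Int → List Int} : ∀ (n : Nat) {X : List Int},
    X ⊆ pvReach succ n X := by
  intro n
  induction n with
  | zero => intro X; simp [pvReach]
  | succ n ih =>
    intro X x hx
    simpa only [pvReach] using ih (pvStep_grow hx)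

theorem pvChain_reach {succ : Int → List Int} :
    ∀ (L : List Int) (n : Nat) (a s : Int),
      List.IsChain (fun u v => v ∈ succ u) (a :: (L ++ [s])) → L.length ≤ n →
      s ∈ pvReach succ n (succ a) := by
  intro L
  induction L with
  | nil =>
    intro n a s h _
    rw [List.nil_append, List.isChain_cons_cons] at h
    exact pvReach_grow n h.1
  | cons b L ih =>
    intro n a s h hlen
    rw [List.cons_append, List.isChain_cons_cons] at h
    obtain ⟨n', rfl⟩ : ∃ n', n = n' + 1 := ⟨n - 1, by simp at hlen; omega⟩
    have hs := ih n' b s h.2 (by simp at hlen ⊢; omega)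
    have hsub : succ b ⊆ pvStepR succ (succ a) := pvStep_succs_sub h.1
    simpa only [pvReach] using pvReach_mono n' hsub hs

-- walking a chain from an element of X stays inside pvReach
theorem pvChain_reach0 {succ : Int → List Int} :
    ∀ (L : List Int) (n : Nat) (a : Int) (X : List Int),
      a ∈ X → List.IsChain (fun u v => v ∈ succ u) (a :: L) → L.length ≤ n →
      L.getLastD a ∈ pvReach succ n X := by
  intro L
  induction L with
  | nil =>
    intro n a X ha _ _
    simpa using pvReach_grow n ha
  | cons b L ih =>
    intro n a X ha h hlen
    rw [List.isChain_cons_cons] at h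
    obtain ⟨n', rfl⟩ : ∃ n', n = n' + 1 := ⟨n - 1, by simp at hlen; omega⟩
    have hb : b ∈ pvStepR succ X := pvStep_succs_sub ha h.1
    have := ih n' b (pvStepR succ X) hb h.2 (by simp at hlen ⊢; omega)
    simpa only [pvReach, List.getLastD_cons] using this

theorem pvChainSnoc {R : Int → Int → Prop} :
    ∀ (l : List Int) (a b : Int), List.IsChain R (a :: l) → R (l.getLastD a) b →
      List.IsChain R (a :: (l ++ [b])) := by
  intro l
  induction l with
  | nil =>
    intro a b _ h
    exact List.isChain_cons_cons.mpr ⟨h, List.isChain_singleton b⟩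
  | cons x l ih =>
    intro a b h hR
    rw [List.isChain_cons_cons] at h
    rw [List.cons_append, List.isChain_cons_cons]
    rw [List.getLastD_cons] at hR
    exact ⟨h.1, ih x b h.2 hR⟩

theorem pvAvLen {mbl : List (Int × PVNode)} {av : List Int} (hnd : av.Nodup)
    (hsub : ∀ x ∈ av, x ∈ mbl.map Prod.fst) : av.length ≤ mbl.length := by
  calc av.length = av.toFinset.card := (List.toFinset_card_of_nodup hnd).symm
  _ ≤ (mbl.map Prod.fst).toFinset.card :=
      Finset.card_le_card (fun x hx => List.mem_toFinset.mpr (hsub x (List.mem_toFinset.mp hx)))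
  _ ≤ (mbl.map Prod.fst).length := List.toFinset_card_le _
  _ = mbl.length := List.length_map ..

-- under Pre_ a source edge never points back into the current ancestor path
theorem pvNoRevisit {mbl : List (Int × PVNode)} {cache : List (Int × List Int)} {match_ : PVNode}
    (hpre : ∀ k ∈ pvReachRoot match_ mbl (cache.map Prod.fst),
      k ∉ pvReach (pvSuccsU mbl (cache.map Prod.fst)) mbl.length
            (pvSuccsU mbl (cache.map Prod.fst) k))
    {av : List Int} {m child : PVNode} {sid : Option Int} {s : Int}
    (hnd : av.Nodup) (hsub : ∀ x ∈ av, x ∈ mbl.map Prod.fst)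
    (hch : List.IsChain (fun u v => v ∈ pvSuccsU mbl (cache.map Prod.fst) u) av)
    (hhd : ∀ a, av.head? = some a → a ∈ pvSuccsOf mbl (cache.map Prod.fst) match_)
    (hlast : ∀ k, av.getLast? = some k → (PySem.Dict.mk mbl).get? k = some m)
    (hsid : sid ∈ pvSrcs m) (hts : pvTruthy sid = some s)
    (hgs : (PySem.Dict.mk mbl).get? s = some child) (hU : pvUnc (cache.map Prod.fst) child = true) :
    s ∉ av := by
  intro hs
  obtain ⟨u, w, rfl⟩ := List.append_of_mem hs
  have hwlen : (u ++ s :: w).length ≤ mbl.length := pvAvLen hnd hsub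
  -- (B) the cycle: s reaches itself in the uncached graph
  have hlk : (u ++ s :: w).getLast? = some (w.getLastD s) := by
    rw [List.getLast?_append_of_ne_nil _ (by simp), List.getLast?_cons,
      List.getLastD_eq_getLast?]
  have hm := hlast _ hlk
  have hedge : s ∈ pvSuccsU mbl (cache.map Prod.fst) (w.getLastD s) :=
    pvSuccsU_intro hm hsid hts hgs hU
  have hsw : List.IsChain (fun u v => v ∈ pvSuccsU mbl (cache.map Prod.fst) u) (s :: w) :=
    hch.suffix ⟨u, rfl⟩
  have hcyc := pvChainSnoc w s s hsw hedge
  have hBsz : w.length ≤ mbl.length := by simp at hwlen; omega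
  have hB := pvChain_reach w mbl.length s s hcyc hBsz
  -- (A) s is reachable from the root's sources: walk the prefix of the path
  have hA : s ∈ pvReachRoot match_ mbl (cache.map Prod.fst) := by
    unfold pvReachRoot
    cases u with
    | nil =>
      have : s ∈ pvSuccsOf mbl (cache.map Prod.fst) match_ := hhd s (by simp)
      exact pvReach_grow mbl.length this
    | cons a u' =>
      have ha : a ∈ pvSuccsOf mbl (cache.map Prod.fst) match_ := hhd a (by simp)
      have hpref : List.IsChain (fun u v => v ∈ pvSuccsU mbl (cache.map Prod.fst) u)
          (a :: (u' ++ [s])) := by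
        apply hch.prefix
        exact ⟨w, by simp⟩
      have hlen : (u' ++ [s]).length ≤ mbl.length := by
        simp at hwlen ⊢; omega
      have := pvChain_reach0 (u' ++ [s]) mbl.length a
        (pvSuccsOf mbl (cache.map Prod.fst) match_) ha hpref hlen
      rwa [show (u' ++ [s]).getLastD a = s from by
        simp [List.getLastD_eq_getLast?, List.getLast?_append]] at this
  exact hpre s hA hB

theorem pvSrcStepOkU (M : PVM) {m : PVNode} {fuel : Nat} {sid : Option Int} {c0 : PVCache}
    (hmem : sid ∈ pvSrcs m)
    (hstep : ∀ {sid' : Option Int} {s : Int} {child : PVNode} (c' : PVCache),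
      sid' ∈ pvSrcs m → pvTruthy sid' = some s → M.get? s = some child →
      pvExt c0 c' → (pvGoA M fuel child c').isSome) :
    ∀ (p : PySem.Set Int) (c' : PVCache), pvExt c0 c' →
      ∃ st, pvSrcStep M (pvGoA M fuel) (some (p, c')) sid = some st := by
  intro p c' hext
  cases ht : pvTruthy sid with
  | none => exact ⟨(p, c'), by simp [pvSrcStep, ht]⟩
  | some s =>
    cases hg : M.get? s with
    | none => exact ⟨(p, c'), by simp [pvSrcStep, ht, hg]⟩
    | some child =>
      obtain ⟨x, hx⟩ := Option.isSome_iff_exists.mp (hstep c' hmem ht hg hext)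
      obtain ⟨v, cc⟩ := x
      exact ⟨(p.update v, cc), by simp [pvSrcStep, ht, hg, hx]⟩

theorem pvGoBodyU (M : PVM) {m : PVNode} {fuel : Nat} {c0 : PVCache} (c : PVCache)
    (hext : pvExt c0 c)
    (hstep : ∀ {sid' : Option Int} {s : Int} {child : PVNode} (c' : PVCache),
      sid' ∈ pvSrcs m → pvTruthy sid' = some s → M.get? s = some child →
      pvExt c0 c' → (pvGoA M fuel child c').isSome) :
    (pvGoA M (fuel + 1) m c).isSome := by
  simp only [pvGoA]
  cases hc : PySem.Dict.get? c (pvIdOf m) with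
  | some v => simp
  | none =>
    rw [pvFold2]
    obtain ⟨⟨p1, c1⟩, h1⟩ := pvSrcStepOkU M (sid := pvGetOpt m "source1_match_id")
      (by simp [pvSrcs]) hstep (pvPlayers0 m) c hext
    rw [h1]
    have hext1 : pvExt c0 c1 := fun j w hj =>
      pvSrcStep_preserve M (fun {m c v c'} hh {j w} hjw => pvGoA_preserve M fuel hh hjw) h1
        (hext j w hj)
    obtain ⟨⟨p2, c2⟩, h2⟩ := pvSrcStepOkU M (sid := pvGetOpt m "source2_match_id")
      (by simp [pvSrcs]) hstep p1 c1 hext1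
    rw [h2]
    simp

theorem pvGoA_suffU (mbl : List (Int × PVNode)) (cache : List (Int × List Int)) (match_ : PVNode)
    (hpre : ∀ k ∈ pvReachRoot match_ mbl (cache.map Prod.fst),
      k ∉ pvReach (pvSuccsU mbl (cache.map Prod.fst)) mbl.length
            (pvSuccsU mbl (cache.map Prod.fst) k)) :
    ∀ (n : Nat) (av : List Int) (m : PVNode) (c : PVCache),
      pvExt (PySem.Dict.mk (cache.map (fun q => ((some q.1 : Option Int), q.2)))) c →
      av.Nodup → (∀ x ∈ av, x ∈ mbl.map Prod.fst) →
      List.IsChain (fun u v => v ∈ pvSuccsU mbl (cache.map Prod.fst) u) av →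
      (av = [] → m = match_) →
      (∀ a, av.head? = some a → a ∈ pvSuccsOf mbl (cache.map Prod.fst) match_) →
      (∀ k, av.getLast? = some k → (PySem.Dict.mk mbl).get? k = some m) →
      ((mbl.map Prod.fst).toFinset \ av.toFinset).card ≤ n →
      (pvGoA (PySem.Dict.mk mbl) (n + 2) m c).isSome := by
  intro n
  induction n with
  | zero =>
    intro av m c hext hnd hsub hch h0 hhd hlast hcard
    apply pvGoBodyU _ c hext
    intro sid s child c' hsid hts hgs hext'
    cases hcc : c'.get? (pvIdOf child) with
    | some v => simp [pvGoA_hit_succ (PySem.Dict.mk mbl) (f := 0) hcc]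
    | none =>
      exfalso
      have hU : pvUnc (cache.map Prod.fst) child = true := by
        apply pvUnc_of_none
        cases hc0 : (PySem.Dict.mk (cache.map (fun q => ((some q.1 : Option Int), q.2)))).get? (pvIdOf child) with
        | none => rfl
        | some w => rw [hext' _ _ hc0] at hcc; cases hcc
      have hKs : s ∈ mbl.map Prod.fst := pvMemKeys hgs
      have hnav : s ∉ av := pvNoRevisit hpre hnd hsub hch hhd hlast hsid hts hgs hU
      have hmem : s ∈ (mbl.map Prod.fst).toFinset \ av.toFinset :=
        Finset.mem_sdiff.mpr ⟨List.mem_toFinset.mpr hKs, fun hx => hnav (List.mem_toFinset.mp hx)⟩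
      have := Finset.card_pos.mpr ⟨s, hmem⟩
      omega
  | succ n ih =>
    intro av m c hext hnd hsub hch h0 hhd hlast hcard
    apply pvGoBodyU _ c hext
    intro sid s child c' hsid hts hgs hext'
    cases hcc : c'.get? (pvIdOf child) with
    | some v => simp [pvGoA_hit_succ (PySem.Dict.mk mbl) (f := n+1) hcc]
    | none =>
      have hU : pvUnc (cache.map Prod.fst) child = true := by
        apply pvUnc_of_none
        cases hc0 : (PySem.Dict.mk (cache.map (fun q => ((some q.1 : Option Int), q.2)))).get? (pvIdOf child) with
        | none => rfl
        | some w => rw [hext' _ _ hc0] at hcc; cases hcc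
      have hKs : s ∈ mbl.map Prod.fst := pvMemKeys hgs
      have hnav : s ∉ av := pvNoRevisit hpre hnd hsub hch hhd hlast hsid hts hgs hU
      have hmem : s ∈ (mbl.map Prod.fst).toFinset \ av.toFinset :=
        Finset.mem_sdiff.mpr ⟨List.mem_toFinset.mpr hKs, fun hx => hnav (List.mem_toFinset.mp hx)⟩
      apply ih (av ++ [s]) child c' hext'
      · exact List.nodup_append.mpr ⟨hnd, List.nodup_singleton s,
          fun a ha b hb => by simp at hb; subst hb; exact fun he => hnav (he ▸ ha)⟩
      · intro x hx
        rcases List.mem_append.mp hx with hx | hx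
        · exact hsub x hx
        · simp at hx; subst hx; exact hKs
      · cases hav : av with
        | nil => simp only [List.nil_append]; exact List.isChain_singleton s
        | cons a l =>
          rw [List.cons_append]
          apply pvChainSnoc l a s (hav ▸ hch)
          have hlk : av.getLast? = some (l.getLastD a) := by
            rw [hav, List.getLast?_cons, List.getLastD_eq_getLast?]
          exact pvSuccsU_intro (hlast _ hlk) hsid hts hgs hU
      · intro hemp; simp at hemp
      · intro a ha
        cases hav : av with
        | nil =>
          rw [hav] at ha
          simp at ha
          subst ha
          exact pvSuccsOf_intro (m := match_) (h0 hav ▸ hsid) hts hgs hU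
        | cons b l =>
          rw [hav] at ha
          simp at ha
          exact hhd a (by rw [hav]; simpa using ha)
      · intro k hk
        rw [List.getLast?_concat] at hk
        cases hk
        exact hgs
      · have htf : (av ++ [s]).toFinset = insert s av.toFinset := by
          rw [List.toFinset_append]
          simp [Finset.union_singleton]
        rw [htf, Finset.sdiff_insert, Finset.card_erase_of_mem hmem]
        omega

theorem pvGoA_total (mbl : List (Int × PVNode)) (cache : List (Int × List Int)) (match_ : PVNode)
    (hpre : ∀ k ∈ pvReachRoot match_ mbl (cache.map Prod.fst),
      k ∉ pvReach (pvSuccsU mbl (cache.map Prod.fst)) mbl.length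
            (pvSuccsU mbl (cache.map Prod.fst) k)) :
    (pvGoA (PySem.Dict.mk mbl) (mbl.length + 2) match_
      (PySem.Dict.mk (cache.map (fun q => ((some q.1 : Option Int), q.2))))).isSome := by
  apply pvGoA_suffU mbl cache match_ hpre mbl.length [] match_ _
    (fun j w hj => hj) (by simp) (by simp) (by simp) (fun _ => rfl) (by simp) (by simp)
  simp only [List.toFinset_nil, Finset.sdiff_empty]
  calc (mbl.map Prod.fst).toFinset.card ≤ (mbl.map Prod.fst).length := List.toFinset_card_le _
  _ = mbl.length := List.length_map ..

-- ===== VERDICT =====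
theorem possible_players_for_match_local_spec : Claim_equal_possible_players_for_match_local := by
  unfold Claim_equal_possible_players_for_match_local
  intro match_ mbl cache _ hpre
  unfold Pre_possible_players_for_match_local at hpre
  unfold Spec_possible_players_for_match_local
  simp only [possible_players_for_match_local, possible_players_for_match_local_alt]
  cases hc : (PySem.Dict.mk (List.map (fun q => ((some q.1 : Option Int), q.2)) cache)).get? (pvIdOf match_) with
  | some v =>
    have hA : pvGoA (PySem.Dict.mk mbl) (mbl.length + 2) match_
        (PySem.Dict.mk (List.map (fun q => ((some q.1 : Option Int), q.2)) cache)) =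
        some (v, PySem.Dict.mk (List.map (fun q => ((some q.1 : Option Int), q.2)) cache)) := by
      rw [show mbl.length + 2 = (mbl.length + 1) + 1 from rfl]
      simp [pvGoA, hc]
    simp [hA]
  | none =>
    have hpre' : ∀ k ∈ pvReachRoot match_ mbl (cache.map Prod.fst),
        k ∉ pvReach (pvSuccsU mbl (cache.map Prod.fst)) mbl.length
              (pvSuccsU mbl (cache.map Prod.fst) k) := by
      rcases hpre with hpre | hpre
      · rw [hc] at hpre; cases hpre
      · exact hpre
    obtain ⟨⟨v, c'⟩, hx⟩ := Option.isSome_iff_exists.mp (pvGoA_total mbl cache match_ hpre')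
    have hrun := pvSim (PySem.Dict.mk mbl) (mbl.length + 2) hx (rest := []) (fb := 0) (r := c')
      (by simp [pvRunB])
    rw [show mbl.length + 2 + 2 = mbl.length + 4 from by omega] at hrun
    have hpw : (2:Nat) ≤ 2 ^ (mbl.length + 4) := by
      calc (2:Nat) = 2 ^ 1 := by norm_num
      _ ≤ 2 ^ (mbl.length + 4) := Nat.pow_le_pow_right (by norm_num) (by omega)
    have hrun' : pvRunB (PySem.Dict.mk mbl) (2 ^ (mbl.length + 4)) [(match_, false)]
        (PySem.Dict.mk (List.map (fun q => ((some q.1 : Option Int), q.2)) cache)) = some c' :=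
      pvRunB_mono _ _ (by omega) hrun
    have hval := pvGoA_post (PySem.Dict.mk mbl) (mbl.length + 2) hx
    rw [hx, hrun']
    simp [hval]
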